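-- pv_equiv track=rewrite | github.com/dplocki/advent-of-code | 2023/2023_22.py | count_supported_by
-- ===== SOURCE A (Python) =====
-- from typing import Dict, Generator, Iterable, Tuple
--
-- def count_supported_by(brick_supported_by: Dict[int, set], index: int) -> int:
--     falling = set([index])
--     previous = 0
--
--     while previous != len(falling):
--         previous = len(falling)
--
--         for i in brick_supported_by:
--             if not brick_supported_by[i]:
--                 continue
--
--             if len(brick_supported_by[i] - falling) == 0:
--                 falling.add(i)
--
--     return len(falling) - 1
-- ===== SOURCE B (Python) =====
-- def count_supported_by(brick_supported_by, index):
--     remaining = {}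
--     rev = {}
--     for i, supp in brick_supported_by.items():
--         remaining[i] = len(supp)
--         for s in supp:
--             rev.setdefault(s, []).append(i)
--     fallen = {index}
--     stack = [index]
--     while stack:
--         u = stack.pop()
--         for i in rev.get(u, []):
--             remaining[i] -= 1
--             if remaining[i] == 0 and i not in fallen:
--                 fallen.add(i)
--                 stack.append(i)
--     return len(fallen) - 1
-- ===== Notes on version B (the rewrite author's own statement) =====
-- stated objective: alternative
-- what changed: Replaces the repeated full rescans of the dict until the falling set stops growing by a one-pass build of a reverse-adjacency index plus per-brick support counters, then a worklist (Kahn-style) propagation that touches each support edge once.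
import Mathlib
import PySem

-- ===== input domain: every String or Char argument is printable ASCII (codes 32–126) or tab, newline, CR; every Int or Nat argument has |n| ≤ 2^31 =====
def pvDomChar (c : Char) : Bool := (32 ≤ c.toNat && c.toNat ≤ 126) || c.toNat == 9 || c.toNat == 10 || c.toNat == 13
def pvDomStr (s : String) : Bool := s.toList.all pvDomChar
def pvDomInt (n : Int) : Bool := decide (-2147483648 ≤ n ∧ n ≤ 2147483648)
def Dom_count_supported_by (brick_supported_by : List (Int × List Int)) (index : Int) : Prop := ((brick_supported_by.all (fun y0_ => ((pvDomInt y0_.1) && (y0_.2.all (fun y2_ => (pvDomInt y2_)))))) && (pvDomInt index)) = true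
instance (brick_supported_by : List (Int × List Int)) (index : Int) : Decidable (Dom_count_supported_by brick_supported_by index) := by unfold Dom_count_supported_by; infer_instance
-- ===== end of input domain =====

-- B replaces A's repeated full rescans of the dict (until the falling set stops growing) by a
-- reverse-adjacency index with per-brick support counters and a worklist propagation that
-- touches each support edge once (objective: alternative algorithm).

-- ===== PORT A =====
-- one body of A's inner `for i in brick_supported_by:` loop (values are Python sets: Set.ofList)
def pvStepA (falling : List Int) (p : Int × List Int) : List Int :=
  let s := PySem.Set.ofList p.2
  if s = [] then falling
  else if (PySem.Set.diff s falling).length = 0 then PySem.Set.add falling p.1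
  else falling

-- one full `for i in brick_supported_by:` pass
def pvPassA (es : List (Int × List Int)) (falling : List Int) : List Int :=
  es.foldl pvStepA falling

-- the `while previous != len(falling):` loop; fuel only makes it total — es.length + 2
-- iterations always reach the fixpoint test (each earlier pass strictly grows `falling`)
def pvLoopA (es : List (Int × List Int)) : Nat → List Int → Int → List Int
  | 0, falling, _ => falling
  | fuel+1, falling, previous =>
    if previous = (falling.length : Int) then falling
    else pvLoopA es fuel (pvPassA es falling) (falling.length : Int)

def count_supported_by (brick_supported_by : List (Int × List Int)) (index : Int) : Int :=
  let es := (PySem.Dict.ofList brick_supported_by).items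
  ((pvLoopA es (es.length + 2) (PySem.Set.ofList [index]) 0).length : Int) - 1

-- ===== PORT B =====
-- build phase: remaining[i] = len(supp); rev[s] gets i appended for each s in supp
def pvBuildB (es : List (Int × List Int)) : PySem.Dict Int Int × PySem.Dict Int (List Int) :=
  es.foldl (fun rr p =>
      let s := PySem.Set.ofList p.2
      (rr.1.insert p.1 (s.length : Int),
       s.foldl (fun rv x => rv.modify x [] (fun l => l ++ [p.1])) rr.2))
    (PySem.Dict.empty, PySem.Dict.empty)

-- one body of B's inner `for i in rev.get(u, []):` loop; state = (remaining, fallen, stack)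
def pvInnerB (st : PySem.Dict Int Int × List Int × List Int) (i : Int) :
    PySem.Dict Int Int × List Int × List Int :=
  let r := st.1.getD i 0 - 1
  let rm2 := st.1.insert i r
  if r = 0 ∧ ¬ (i ∈ st.2.1) then (rm2, st.2.1 ++ [i], st.2.2 ++ [i])
  else (rm2, st.2.1, st.2.2)

-- the `while stack:` loop (stack.pop() pops the last element); fuel only makes it total —
-- every brick is pushed at most once, so es.length + 1 iterations always drain the stack
def pvBFSB (rev : PySem.Dict Int (List Int)) :
    Nat → PySem.Dict Int Int → List Int → List Int → List Int
  | 0, _, fl, _ => fl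
  | fuel+1, rm, fl, q =>
    match q.getLast? with
    | none => fl
    | some u =>
      let st := (rev.getD u []).foldl pvInnerB (rm, fl, q.dropLast)
      pvBFSB rev fuel st.1 st.2.1 st.2.2

def count_supported_by_alt (brick_supported_by : List (Int × List Int)) (index : Int) : Int :=
  let es := (PySem.Dict.ofList brick_supported_by).items
  let b := pvBuildB es
  ((pvBFSB b.2 (es.length + 1) b.1 [index] [index]).length : Int) - 1

-- ===== PRECONDITION & SPEC =====
def Spec_count_supported_by (brick_supported_by : List (Int × List Int)) (index : Int) (out : Int) : Prop := out = count_supported_by_alt brick_supported_by index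
instance (brick_supported_by : List (Int × List Int)) (index : Int) (out : Int) : Decidable (Spec_count_supported_by brick_supported_by index out) := by unfold Spec_count_supported_by; infer_instance

-- ===== CLAIM (what is proved, stated in full; the proofs are below) =====
def Claim_equal_count_supported_by : Prop := ∀ (brick_supported_by : List (Int × List Int)) (index : Int), Dom_count_supported_by brick_supported_by index → Spec_count_supported_by brick_supported_by index (count_supported_by brick_supported_by index)

-- ===== LEMMAS AND PROOFS =====

-- the specification predicate: x falls when `index` is removed
inductive pvFalls (es : List (Int × List Int)) (index : Int) : Int → Prop
  | base : pvFalls es index index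
  | step (p : Int × List Int) (hp : p ∈ es) (hne : p.2 ≠ [])
      (h : ∀ x ∈ p.2, pvFalls es index x) : pvFalls es index p.1

lemma pv_ofList_eq_nil {l : List Int} : PySem.Set.ofList l = [] ↔ l = [] := by
  constructor
  · intro h
    cases l with
    | nil => rfl
    | cons a t =>
      have : a ∈ PySem.Set.ofList (a :: t) := (PySem.Set.mem_ofList _ _).2 (by simp)
      rw [h] at this; simp at this
  · intro h; subst h; rfl

lemma pv_diff_len_zero {s f : List Int} :
    (PySem.Set.diff s f).length = 0 ↔ ∀ x ∈ s, x ∈ f := by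
  unfold PySem.Set.diff
  rw [List.length_eq_zero_iff, List.filter_eq_nil_iff]
  constructor
  · intro h x hx
    exact (PySem.Set.contains_iff f x).1 (by simpa using h x hx)
  · intro h x hx
    simp [h x hx]

-- --- A side ---

lemma pv_stepA_prefix (f : List Int) (p : Int × List Int) : f <+: pvStepA f p := by
  unfold pvStepA PySem.Set.add
  dsimp only
  split_ifs <;> first | exact List.prefix_refl _ | exact ⟨[p.1], rfl⟩

lemma pv_passA_prefix (l : List (Int × List Int)) (f : List Int) :
    f <+: List.foldl pvStepA f l := by
  induction l generalizing f with
  | nil => simp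
  | cons p l ih =>
    simpa using (pv_stepA_prefix f p).trans (ih (pvStepA f p))

lemma pv_mem_stepA {f : List Int} {p : Int × List Int} {x : Int} (h : x ∈ pvStepA f p) :
    x ∈ f ∨ x = p.1 := by
  unfold pvStepA at h
  dsimp only at h
  split_ifs at h with h1 h2
  · exact Or.inl h
  · rcases (PySem.Set.mem_add _ _ _).1 h with h' | h'
    · exact Or.inl h'
    · exact Or.inr h'
  · exact Or.inl h

lemma pv_stepA_nodup {f : List Int} (p : Int × List Int) (h : f.Nodup) : (pvStepA f p).Nodup := by
  unfold pvStepA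
  dsimp only
  split_ifs <;> first | exact h | exact PySem.Set.nodup_add _ _ h

lemma pv_passA_nodup (l : List (Int × List Int)) {f : List Int} (h : f.Nodup) :
    (List.foldl pvStepA f l).Nodup := by
  induction l generalizing f with
  | nil => simpa using h
  | cons p l ih => simpa using ih (pv_stepA_nodup p h)

lemma pv_mem_passA {l : List (Int × List Int)} {f : List Int} {x : Int}
    (h : x ∈ List.foldl pvStepA f l) : x ∈ f ∨ x ∈ l.map Prod.fst := by
  induction l generalizing f with
  | nil => simpa using h
  | cons p l ih =>
    simp only [List.foldl_cons] at h
    rcases ih h with h' | h'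
    · rcases pv_mem_stepA h' with h'' | h''
      · exact Or.inl h''
      · exact Or.inr (by simp [h''])
    · exact Or.inr (by simp [h'])

lemma pv_passA_sound (es : List (Int × List Int)) (index : Int) :
    ∀ (l : List (Int × List Int)) (f : List Int), (∀ p ∈ l, p ∈ es) →
    (∀ x ∈ f, pvFalls es index x) → ∀ x ∈ List.foldl pvStepA f l, pvFalls es index x := by
  intro l
  induction l with
  | nil => intro f _ hf; simpa using hf
  | cons p l ih =>
    intro f hl hf
    simp only [List.foldl_cons]
    refine ih _ (fun q hq => hl q (by simp [hq])) ?_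
    intro x hx
    rcases pv_mem_stepA hx with h' | h'
    · exact hf x h'
    · subst h'
      unfold pvStepA at hx
      dsimp only at hx
      split_ifs at hx with h1 h2
      · exact hf _ hx
      · have hsub : ∀ y ∈ p.2, y ∈ f := by
          intro y hy
          exact pv_diff_len_zero.1 h2 y ((PySem.Set.mem_ofList _ _).2 hy)
        have hne : p.2 ≠ [] := by
          intro hnil
          exact h1 (by simp [hnil])
        exact pvFalls.step p (hl p (by simp)) hne (fun y hy => hf y (hsub y hy))
      · exact hf _ hx

lemma pv_add_eq_self {f : List Int} {x : Int} (h : PySem.Set.add f x = f) : x ∈ f := by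
  unfold PySem.Set.add at h
  split_ifs at h with hc
  · exact (PySem.Set.contains_iff f x).1 hc
  · exact absurd (congrArg List.length h) (by simp)

lemma pv_passA_fix_closed :
    ∀ (l : List (Int × List Int)) (f : List Int), List.foldl pvStepA f l = f →
    ∀ p ∈ l, p.2 ≠ [] → (∀ x ∈ p.2, x ∈ f) → p.1 ∈ f := by
  intro l
  induction l with
  | nil => simp
  | cons p0 l ih =>
    intro f hfix q hq hne hsub
    simp only [List.foldl_cons] at hfix
    have hpre1 : f <+: pvStepA f p0 := pv_stepA_prefix f p0
    have hpre2 : pvStepA f p0 <+: f := by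
      have h2 := pv_passA_prefix l (pvStepA f p0)
      rw [hfix] at h2; exact h2
    have hstep : pvStepA f p0 = f :=
      hpre2.eq_of_length (le_antisymm hpre2.length_le hpre1.length_le)
    rcases List.mem_cons.1 hq with hq | hq
    · subst hq
      unfold pvStepA at hstep
      dsimp only at hstep
      rw [if_neg (fun hnil => hne (pv_ofList_eq_nil.1 hnil)),
        if_pos (pv_diff_len_zero.2
          (fun x hx => hsub x ((PySem.Set.mem_ofList _ _).1 hx)))] at hstep
      exact pv_add_eq_self hstep
    · exact ih f (by rw [hstep] at hfix; exact hfix) q hq hne hsub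

lemma pv_falls_mem_of_closed (es : List (Int × List Int)) (index : Int) (f : List Int)
    (hidx : index ∈ f)
    (hcl : ∀ p ∈ es, p.2 ≠ [] → (∀ x ∈ p.2, x ∈ f) → p.1 ∈ f) :
    ∀ x, pvFalls es index x → x ∈ f := by
  intro x h
  induction h with
  | base => exact hidx
  | step p hp hne _ ih => exact hcl p hp hne ih

lemma pv_nodup_len_le {f U : List Int} (h : f.Nodup) (hs : ∀ x ∈ f, x ∈ U) :
    f.length ≤ U.length := by
  classical
  calc f.length = f.toFinset.card := (List.toFinset_card_of_nodup h).symm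
    _ ≤ U.toFinset.card := Finset.card_le_card (fun a ha => by
        simp only [List.mem_toFinset] at *
        exact hs a ha)
    _ ≤ U.length := U.toFinset_card_le

lemma pv_loopA_spec (es : List (Int × List Int)) (index : Int) :
    ∀ (fuel : Nat) (f : List Int) (prev : Int),
    f.Nodup → (∀ x ∈ f, x ∈ index :: es.map Prod.fst) → (∀ x ∈ f, pvFalls es index x) →
    index ∈ f →
    (prev = (f.length : Int) → pvPassA es f = f) →
    (prev ≠ (f.length : Int) → es.length + 2 ≤ fuel + f.length) →
    (pvLoopA es fuel f prev).Nodup ∧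
      (∀ x, x ∈ pvLoopA es fuel f prev ↔ pvFalls es index x) := by
  intro fuel
  induction fuel with
  | zero =>
    intro f prev hnd hU hsound hidx hfix hfuel
    by_cases hp : prev = (f.length : Int)
    · rw [pvLoopA]
      refine ⟨hnd, fun x => ⟨fun hx => hsound x hx, ?_⟩⟩
      intro hx
      refine pv_falls_mem_of_closed es index f hidx ?_ x hx
      intro p hp' hne hsub
      exact pv_passA_fix_closed es f (hfix hp) p hp' hne hsub
    · have := hfuel hp
      have hle := pv_nodup_len_le hnd hU
      simp at hle
      omega
  | succ fuel ih =>
    intro f prev hnd hU hsound hidx hfix hfuel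
    rw [pvLoopA]
    by_cases hp : prev = (f.length : Int)
    · rw [if_pos hp]
      refine ⟨hnd, fun x => ⟨fun hx => hsound x hx, ?_⟩⟩
      intro hx
      refine pv_falls_mem_of_closed es index f hidx ?_ x hx
      intro p hp' hne hsub
      exact pv_passA_fix_closed es f (hfix hp) p hp' hne hsub
    · rw [if_neg hp]
      have hpre : f <+: pvPassA es f := pv_passA_prefix es f
      refine ih (pvPassA es f) (f.length : Int)
        (pv_passA_nodup es hnd)
        (fun x hx => ?_)
        (pv_passA_sound es index es f (fun p hp => hp) hsound)
        (hpre.subset hidx)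
        (fun heq => ?_)
        (fun hne => ?_)
      · rcases pv_mem_passA hx with h' | h'
        · exact hU x h'
        · exact List.mem_cons_of_mem _ h'
      · -- length unchanged by the pass ⇒ the pass was the identity ⇒ next pass is too
        have hflen : (pvPassA es f).length = f.length := by exact_mod_cast heq.symm
        have : pvPassA es f = f := by
          exact (List.IsPrefix.eq_of_length hpre hflen.symm).symm
        rw [this]
        exact this
      · have hlt : f.length < (pvPassA es f).length := by
          rcases Nat.lt_or_ge f.length (pvPassA es f).length with h | h
          · exact h
          · exfalso
            have : pvPassA es f = f :=
              (List.IsPrefix.eq_of_length hpre (le_antisymm hpre.length_le h)).symm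
            exact hne (by rw [this])
        have := hfuel hp
        omega

lemma pv_A_char (es : List (Int × List Int)) (index : Int) :
    (pvLoopA es (es.length + 2) (PySem.Set.ofList [index]) 0).Nodup ∧
      (∀ x, x ∈ pvLoopA es (es.length + 2) (PySem.Set.ofList [index]) 0 ↔ pvFalls es index x) := by
  have hset : PySem.Set.ofList [index] = [index] := rfl
  rw [hset]
  refine pv_loopA_spec es index (es.length + 2) [index] 0 (by simp) ?_ ?_ (by simp) ?_ ?_
  · intro x hx; simp at hx; simp [hx]
  · intro x hx; simp at hx; subst hx; exact pvFalls.base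
  · intro h; exact absurd h (by simp)
  · intro _; simp

-- --- B side: build phase characterisation ---

def pvSupp (p : Int × List Int) : List Int := PySem.Set.ofList p.2

def pvRevAt (es : List (Int × List Int)) (u : Int) : List Int :=
  (es.filter (fun p => (PySem.Set.ofList p.2).contains u)).map Prod.fst

lemma pv_build_fst (l : List (Int × List Int)) (rr : PySem.Dict Int Int × PySem.Dict Int (List Int)) :
    (List.foldl (fun rr p =>
      let s := PySem.Set.ofList p.2
      (rr.1.insert p.1 (s.length : Int),
       s.foldl (fun rv x => rv.modify x [] (fun l => l ++ [p.1])) rr.2)) rr l).1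
    = List.foldl (fun rm p => rm.insert p.1 ((PySem.Set.ofList p.2).length : Int)) rr.1 l := by
  induction l generalizing rr with
  | nil => rfl
  | cons p l ih =>
    simp only [List.foldl_cons]
    exact ih _

lemma pv_build_snd (l : List (Int × List Int)) (rr : PySem.Dict Int Int × PySem.Dict Int (List Int)) :
    (List.foldl (fun rr p =>
      let s := PySem.Set.ofList p.2
      (rr.1.insert p.1 (s.length : Int),
       s.foldl (fun rv x => rv.modify x [] (fun l => l ++ [p.1])) rr.2)) rr l).2
    = List.foldl (fun rv p => (PySem.Set.ofList p.2).foldl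
        (fun rv x => rv.modify x [] (fun l => l ++ [p.1])) rv) rr.2 l := by
  induction l generalizing rr with
  | nil => rfl
  | cons p l ih =>
    simp only [List.foldl_cons]
    exact ih _

lemma pv_filter_beq_nodup {s : List Int} (h : s.Nodup) (u : Int) :
    s.filter (fun x => x == u) = if u ∈ s then [u] else [] := by
  induction s with
  | nil => simp
  | cons a t ih =>
    rcases List.nodup_cons.1 h with ⟨ha, ht⟩
    by_cases hau : a = u
    · subst hau
      simp [ha, ih ht]
    · simp only [List.filter_cons, beq_iff_eq, if_neg hau, ih ht]
      have : (u ∈ a :: t) ↔ u ∈ t := by simp [Ne.symm hau]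
      rw [if_congr this rfl rfl]

lemma pv_rev_single (p : Int × List Int) (rv : PySem.Dict Int (List Int)) (u : Int) :
    ((PySem.Set.ofList p.2).foldl (fun rv x => rv.modify x [] (fun l => l ++ [p.1])) rv).getD u []
      = rv.getD u [] ++ (if (PySem.Set.ofList p.2).contains u then [p.1] else []) := by
  have hmap : (PySem.Set.ofList p.2).foldl (fun rv x => rv.modify x [] (fun l => l ++ [p.1])) rv
      = ((PySem.Set.ofList p.2).map (fun x => (x, p.1))).foldl
          (fun d q => d.modify q.1 [] (fun l => l ++ [q.2])) rv := by
    rw [List.foldl_map]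
  rw [hmap, PySem.Dict.getD_foldl_modify_append]
  congr 1
  rw [List.filter_map]
  have : ((PySem.Set.ofList p.2).filter ((fun q => q.1 == u) ∘ (fun x => (x, p.1))))
      = (PySem.Set.ofList p.2).filter (fun x => x == u) := rfl
  rw [this, pv_filter_beq_nodup (PySem.Set.nodup_ofList p.2) u]
  by_cases hu : u ∈ PySem.Set.ofList p.2
  · simp [hu]
  · have hc : ¬ (PySem.Set.ofList p.2).contains u = true :=
      fun hc => hu ((PySem.Set.contains_iff _ _).1 hc)
    simp only [if_neg hu, if_neg hc]
    simp

lemma pv_rev_fold (l : List (Int × List Int)) (rv : PySem.Dict Int (List Int)) (u : Int) :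
    (List.foldl (fun rv p => (PySem.Set.ofList p.2).foldl
        (fun rv x => rv.modify x [] (fun l => l ++ [p.1])) rv) rv l).getD u []
      = rv.getD u [] ++ (l.filter (fun p => (PySem.Set.ofList p.2).contains u)).map Prod.fst := by
  induction l generalizing rv with
  | nil => simp
  | cons p l ih =>
    simp only [List.foldl_cons]
    rw [ih, pv_rev_single, List.filter_cons]
    by_cases hc : (PySem.Set.ofList p.2).contains u = true
    · rw [if_pos hc, if_pos hc]
      simp
    · rw [if_neg hc, if_neg hc]
      simp

lemma pv_rev_getD (es : List (Int × List Int)) (u : Int) :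
    ((pvBuildB es).2).getD u [] = pvRevAt es u := by
  unfold pvBuildB pvRevAt
  rw [pv_build_snd, pv_rev_fold]
  simp [PySem.Dict.getD_empty]

lemma pv_rm_not_mem (l : List (Int × List Int)) (rm : PySem.Dict Int Int) {i : Int}
    (h : i ∉ l.map Prod.fst) :
    (List.foldl (fun rm p => rm.insert p.1 ((PySem.Set.ofList p.2).length : Int)) rm l).getD i 0
      = rm.getD i 0 := by
  induction l generalizing rm with
  | nil => rfl
  | cons p l ih =>
    simp only [List.map_cons, List.mem_cons, not_or] at h
    simp only [List.foldl_cons]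
    rw [ih _ h.2, PySem.Dict.getD_insert, if_neg h.1]

lemma pv_rm_getD (es : List (Int × List Int)) (hk : (es.map Prod.fst).Nodup)
    {p : Int × List Int} (hp : p ∈ es) :
    ((pvBuildB es).1).getD p.1 0 = ((PySem.Set.ofList p.2).length : Int) := by
  unfold pvBuildB
  rw [pv_build_fst]
  revert hk hp
  generalize (PySem.Dict.empty, PySem.Dict.empty).1 = rm
  induction es generalizing rm with
  | nil => intro _ hp; exact absurd hp (by simp)
  | cons q l ih =>
    intro hk hp
    simp only [List.foldl_cons]
    rcases List.mem_cons.1 hp with hq | hq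
    · subst hq
      have hnm : p.1 ∉ l.map Prod.fst := by
        simp only [List.map_cons, List.nodup_cons] at hk
        exact hk.1
      rw [pv_rm_not_mem _ _ hnm, PySem.Dict.getD_insert, if_pos rfl]
    · exact ih _ (by simp only [List.map_cons, List.nodup_cons] at hk; exact hk.2) hq

lemma pv_mem_revAt {es : List (Int × List Int)} {u i : Int} :
    i ∈ pvRevAt es u ↔ ∃ s, (i, s) ∈ es ∧ u ∈ PySem.Set.ofList s := by
  unfold pvRevAt
  simp only [List.mem_map, List.mem_filter]
  constructor
  · rintro ⟨p, ⟨hp, hc⟩, rfl⟩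
    exact ⟨p.2, hp, (PySem.Set.contains_iff _ _).1 hc⟩
  · rintro ⟨s, hs, hu⟩
    exact ⟨(i, s), ⟨hs, by simpa [PySem.Set.contains_iff] using hu⟩, rfl⟩

lemma pv_revAt_nodup {es : List (Int × List Int)} (hk : (es.map Prod.fst).Nodup) (u : Int) :
    (pvRevAt es u).Nodup := by
  unfold pvRevAt
  exact hk.sublist (List.filter_sublist.map Prod.fst)

-- --- B side: BFS invariant ---

def pvInvB (es : List (Int × List Int)) (index : Int)
    (rm : PySem.Dict Int Int) (fl q : List Int) : Prop :=
  fl.Nodup ∧ q.Nodup ∧ (∀ x ∈ q, x ∈ fl) ∧ index ∈ fl ∧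
  (∀ x ∈ fl, x ∈ index :: es.map Prod.fst) ∧
  (∀ x ∈ fl, pvFalls es index x) ∧
  (∀ p ∈ es, rm.getD p.1 0 = ((PySem.Set.ofList p.2).length : Int)
      - ((PySem.Set.ofList p.2).countP (fun x => decide (x ∈ fl ∧ x ∉ q)) : Int)) ∧
  (∀ p ∈ es, p.2 ≠ [] → (∀ x ∈ p.2, x ∈ fl ∧ x ∉ q) → p.1 ∈ fl)

lemma pv_countP_split {l : List Int} (hnd : l.Nodup) {u : Int}
    (p1 p2 : Int → Prop) [DecidablePred p1] [DecidablePred p2]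
    (hco : ∀ x ∈ l, x ≠ u → (p1 x ↔ p2 x)) (h1 : p1 u) (h2 : ¬ p2 u) :
    l.countP (fun x => decide (p1 x)) =
      l.countP (fun x => decide (p2 x)) + (if u ∈ l then 1 else 0) := by
  induction l with
  | nil => simp
  | cons a t ih =>
    rcases List.nodup_cons.1 hnd with ⟨ha, ht⟩
    have hcot : ∀ x ∈ t, x ≠ u → (p1 x ↔ p2 x) := fun x hx => hco x (by simp [hx])
    by_cases hau : a = u
    · subst hau
      have hteq : t.countP (fun x => decide (p1 x)) = t.countP (fun x => decide (p2 x)) :=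
        List.countP_congr (fun x hx => by
          have := hcot x hx (fun h => ha (h ▸ hx))
          simp [this])
      simp [hteq, h1, h2, ha]
    · have := hco a (by simp) hau
      have hmem : (u ∈ a :: t) ↔ u ∈ t := by simp [Ne.symm hau]
      rw [List.countP_cons, List.countP_cons, ih ht hcot, if_congr hmem rfl rfl]
      by_cases hp2 : p2 a
      · simp [hp2, this.2 hp2]
        omega
      · have hnp1 : ¬ p1 a := fun h => hp2 (this.1 h)
        simp [hp2, hnp1]

lemma pv_key_unique {es : List (Int × List Int)} (hk : (es.map Prod.fst).Nodup)
    {p q : Int × List Int} (hp : p ∈ es) (hq : q ∈ es) (h : p.1 = q.1) : p = q := by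
  induction es with
  | nil => exact absurd hp (by simp)
  | cons a t ih =>
    simp only [List.map_cons, List.nodup_cons] at hk
    rcases List.mem_cons.1 hp with hp' | hp' <;> rcases List.mem_cons.1 hq with hq' | hq'
    · rw [hp', hq']
    · exact absurd (h ▸ (List.mem_map_of_mem (f := Prod.fst) hq')) (hp' ▸ hk.1)
    · exact absurd (h ▸ (List.mem_map_of_mem (f := Prod.fst) hp')) (by rw [hq']; exact fun hc => hk.1 (by simpa using hc))
    · exact ih hk.2 hp' hq'

lemma pv_innerB_spec (es : List (Int × List Int)) (index : Int)
    (hk : (es.map Prod.fst).Nodup) (plF plQ : List Int) :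
    ∀ (L : List Int), L.Nodup → (∀ i ∈ L, ∃ s, (i, s) ∈ es ∧ s ≠ []) →
    ∀ (rm : PySem.Dict Int Int) (fl q : List Int),
    (∀ x, (x ∈ fl ∧ x ∉ q) ↔ (x ∈ plF ∧ x ∉ plQ)) →
    fl.Nodup → q.Nodup → (∀ x ∈ q, x ∈ fl) → index ∈ fl →
    (∀ x ∈ fl, x ∈ index :: es.map Prod.fst) →
    (∀ x ∈ fl, pvFalls es index x) →
    (∀ p ∈ es, rm.getD p.1 0 = ((PySem.Set.ofList p.2).length : Int)
        - ((PySem.Set.ofList p.2).countP (fun x => decide (x ∈ plF ∧ x ∉ plQ)) : Int)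
        + (if p.1 ∈ L then 1 else 0)) →
    (∀ p ∈ es, p.2 ≠ [] → p.1 ∉ L → (∀ x ∈ p.2, x ∈ plF ∧ x ∉ plQ) → p.1 ∈ fl) →
    (let st := List.foldl pvInnerB (rm, fl, q) L
     (∀ x, (x ∈ st.2.1 ∧ x ∉ st.2.2) ↔ (x ∈ plF ∧ x ∉ plQ)) ∧
     st.2.1.Nodup ∧ st.2.2.Nodup ∧ (∀ x ∈ st.2.2, x ∈ st.2.1) ∧ index ∈ st.2.1 ∧
     (∀ x ∈ st.2.1, x ∈ index :: es.map Prod.fst) ∧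
     (∀ x ∈ st.2.1, pvFalls es index x) ∧
     (∀ p ∈ es, st.1.getD p.1 0 = ((PySem.Set.ofList p.2).length : Int)
         - ((PySem.Set.ofList p.2).countP (fun x => decide (x ∈ plF ∧ x ∉ plQ)) : Int)) ∧
     (∀ p ∈ es, p.2 ≠ [] → (∀ x ∈ p.2, x ∈ plF ∧ x ∉ plQ) → p.1 ∈ st.2.1) ∧
     st.2.1.length + q.length = st.2.2.length + fl.length) := by
  intro L
  induction L with
  | nil =>
    intro _ _ rm fl q hproc hflnd hqnd hqfl hidx hU hsound hcnt htrig
    refine ⟨hproc, hflnd, hqnd, hqfl, hidx, hU, hsound, ?_, ?_, by simp only [List.foldl_nil]; omega⟩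
    · intro p hp
      simpa using hcnt p hp
    · intro p hp hne hsub
      exact htrig p hp hne (by simp) hsub
  | cons i L' ih =>
    intro hL1 hL2 rm fl q hproc hflnd hqnd hqfl hidx hU hsound hcnt htrig
    rcases List.nodup_cons.1 hL1 with ⟨hiL, hL1'⟩
    obtain ⟨s, hs, hsne⟩ := hL2 i (by simp)
    have hL2' : ∀ j ∈ L', ∃ t, (j, t) ∈ es ∧ t ≠ [] := fun j hj => hL2 j (by simp [hj])
    have hkey : pvInnerB (rm, fl, q) i =
        if rm.getD i 0 - 1 = 0 ∧ ¬ (i ∈ fl) then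
          (rm.insert i (rm.getD i 0 - 1), fl ++ [i], q ++ [i])
        else (rm.insert i (rm.getD i 0 - 1), fl, q) := rfl
    have hci := hcnt (i, s) hs
    simp only [if_pos (show (i, s).1 ∈ i :: L' by simp)] at hci
    have hr : rm.getD i 0 - 1 = ((PySem.Set.ofList s).length : Int)
        - ((PySem.Set.ofList s).countP (fun x => decide (x ∈ plF ∧ x ∉ plQ)) : Int) := by
      rw [hci]; ring
    have hcle : (PySem.Set.ofList s).countP (fun x => decide (x ∈ plF ∧ x ∉ plQ))
        ≤ (PySem.Set.ofList s).length := List.countP_le_length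
    -- the updated counter dictionary is correct for the remaining list L' in both branches
    have hcnt2 : ∀ p ∈ es, (rm.insert i (rm.getD i 0 - 1)).getD p.1 0
        = ((PySem.Set.ofList p.2).length : Int)
          - ((PySem.Set.ofList p.2).countP (fun x => decide (x ∈ plF ∧ x ∉ plQ)) : Int)
          + (if p.1 ∈ L' then 1 else 0) := by
      intro p hp
      rw [PySem.Dict.getD_insert]
      by_cases hpi : p.1 = i
      · have hpeq : p = (i, s) := pv_key_unique hk hp hs hpi
        subst hpeq
        rw [if_pos rfl, if_neg (by simpa using hiL), hr]
        ring
      · rw [if_neg hpi, hcnt p hp]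
        have : (p.1 ∈ i :: L') ↔ p.1 ∈ L' := by simp [hpi]
        rw [if_congr this rfl rfl]
    simp only [List.foldl_cons, hkey]
    by_cases hcond : rm.getD i 0 - 1 = 0 ∧ ¬ (i ∈ fl)
    · rw [if_pos hcond]
      obtain ⟨hr0, hifl⟩ := hcond
      have hiq : i ∉ q := fun h => hifl (hqfl i h)
      -- all supporters of i are processed
      have hall : ∀ x ∈ PySem.Set.ofList s, x ∈ plF ∧ x ∉ plQ := by
        have hceq : (PySem.Set.ofList s).countP (fun x => decide (x ∈ plF ∧ x ∉ plQ))
            = (PySem.Set.ofList s).length := by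
          rw [hr] at hr0; omega
        intro x hx
        have := List.countP_eq_length.1 hceq x hx
        simpa using this
      have hfalli : pvFalls es index i := by
        refine pvFalls.step (i, s) hs hsne ?_
        intro x hx
        have hx' := hall x ((PySem.Set.mem_ofList _ _).2 hx)
        exact hsound x ((hproc x).2 hx').1
      have g1 : ∀ x, (x ∈ fl ++ [i] ∧ x ∉ q ++ [i]) ↔ (x ∈ plF ∧ x ∉ plQ) := by
        intro x
        by_cases hxi : x = i
        · subst hxi
          constructor
          · rintro ⟨-, hxq⟩; exact absurd (by simp) hxq
          · intro hP; exact absurd ((hproc x).2 hP) (by simp [hifl, hiq])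
        · rw [← hproc x]
          simp [hxi]
      have g2 : (fl ++ [i]).Nodup := List.Nodup.append hflnd (by simp) (by simpa using hifl)
      have g3 : (q ++ [i]).Nodup := List.Nodup.append hqnd (by simp) (by simpa using hiq)
      have g4 : ∀ x ∈ q ++ [i], x ∈ fl ++ [i] := by
        intro x hx
        rcases List.mem_append.1 hx with h | h
        · exact List.mem_append_left _ (hqfl x h)
        · exact List.mem_append_right _ h
      have g5 : index ∈ fl ++ [i] := List.mem_append_left _ hidx
      have g6 : ∀ x ∈ fl ++ [i], x ∈ index :: es.map Prod.fst := by
        intro x hx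
        rcases List.mem_append.1 hx with h | h
        · exact hU x h
        · simp only [List.mem_singleton] at h
          subst h
          exact List.mem_cons_of_mem _ (List.mem_map_of_mem (f := Prod.fst) hs)
      have g7 : ∀ x ∈ fl ++ [i], pvFalls es index x := by
        intro x hx
        rcases List.mem_append.1 hx with h | h
        · exact hsound x h
        · simp only [List.mem_singleton] at h; subst h; exact hfalli
      have g8 : ∀ p ∈ es, p.2 ≠ [] → p.1 ∉ L' → (∀ x ∈ p.2, x ∈ plF ∧ x ∉ plQ) →
          p.1 ∈ fl ++ [i] := by
        intro p hp hne hpL hsub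
        by_cases hpi : p.1 = i
        · rw [hpi]; exact List.mem_append_right _ (by simp)
        · exact List.mem_append_left _
            (htrig p hp hne (by simp [hpi, hpL]) hsub)
      obtain ⟨a1, a2, a3, a4, a5, a6, a7, a8, a9, a10⟩ :=
        ih hL1' hL2' (rm.insert i (rm.getD i 0 - 1)) (fl ++ [i]) (q ++ [i])
          g1 g2 g3 g4 g5 g6 g7 hcnt2 g8
      refine ⟨a1, a2, a3, a4, a5, a6, a7, a8, a9, ?_⟩
      simp only [List.length_append, List.length_cons, List.length_nil] at a10 ⊢
      omega
    · rw [if_neg hcond]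
      have g8 : ∀ p ∈ es, p.2 ≠ [] → p.1 ∉ L' → (∀ x ∈ p.2, x ∈ plF ∧ x ∉ plQ) →
          p.1 ∈ fl := by
        intro p hp hne hpL hsub
        by_cases hpi : p.1 = i
        · have hpeq : p = (i, s) := pv_key_unique hk hp hs hpi
          subst hpeq
          have hceq : (PySem.Set.ofList s).countP (fun x => decide (x ∈ plF ∧ x ∉ plQ))
              = (PySem.Set.ofList s).length := by
            refine List.countP_eq_length.2 ?_
            intro x hx
            have := hsub x ((PySem.Set.mem_ofList _ _).1 hx)
            simpa using this
          have hz : rm.getD i 0 - 1 = 0 := by rw [hr, hceq]; ring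
          by_contra hnf
          exact hcond ⟨hz, hnf⟩
        · exact htrig p hp hne (by simp [hpi, hpL]) hsub
      exact ih hL1' hL2' (rm.insert i (rm.getD i 0 - 1)) fl q hproc hflnd hqnd hqfl hidx hU
        hsound hcnt2 g8

lemma pv_bfsB_spec (es : List (Int × List Int)) (index : Int)
    (hk : (es.map Prod.fst).Nodup) :
    ∀ (fuel : Nat) (rm : PySem.Dict Int Int) (fl q : List Int),
    pvInvB es index rm fl q →
    q.length + es.length + 1 ≤ fuel + fl.length →
    (pvBFSB (pvBuildB es).2 fuel rm fl q).Nodup ∧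
      (∀ x, x ∈ pvBFSB (pvBuildB es).2 fuel rm fl q ↔ pvFalls es index x) := by
  have hdone : ∀ (rm : PySem.Dict Int Int) (fl : List Int), pvInvB es index rm fl [] →
      fl.Nodup ∧ (∀ x, x ∈ fl ↔ pvFalls es index x) := by
    intro rm fl hInv
    obtain ⟨h1, h2, h3, h4, h5, h6, h7, h8⟩ := hInv
    refine ⟨h1, fun x => ⟨fun hx => h6 x hx, ?_⟩⟩
    intro hx
    refine pv_falls_mem_of_closed es index fl h4 ?_ x hx
    intro p hp hne hsub
    exact h8 p hp hne (fun y hy => ⟨hsub y hy, by simp⟩)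
  intro fuel
  induction fuel with
  | zero =>
    intro rm fl q hInv hfuel
    have hq : q = [] := by
      have hle := pv_nodup_len_le hInv.1 hInv.2.2.2.2.1
      simp only [List.length_cons, List.length_map] at hle
      have := List.eq_nil_of_length_eq_zero (by omega : q.length = 0)
      exact this
    subst hq
    exact hdone rm fl hInv
  | succ fuel ih =>
    intro rm fl q hInv hfuel
    rw [pvBFSB]
    cases hq : q.getLast? with
    | none =>
      rw [List.getLast?_eq_none_iff] at hq
      subst hq
      exact hdone rm fl hInv
    | some u =>
      have hqne : q ≠ [] := by
        intro h; subst h; simp at hq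
      have hu : u = q.getLast hqne := by
        rw [List.getLast?_eq_some_getLast hqne] at hq
        exact (Option.some_inj.1 hq).symm
      have hqdec : q.dropLast ++ [u] = q := by
        rw [hu]; exact List.dropLast_concat_getLast hqne
      obtain ⟨h1, h2, h3, h4, h5, h6, h7, h8⟩ := hInv
      have huq : u ∈ q := by
        rw [← hqdec]
        exact List.mem_append_right _ (by exact List.mem_singleton.2 rfl)
      have hufl : u ∈ fl := h3 u huq
      have hq0nd : q.dropLast.Nodup := (List.dropLast_sublist q).nodup h2
      have huq0 : u ∉ q.dropLast := by
        have := h2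
        rw [← hqdec] at this
        rcases List.nodup_append.1 this with ⟨-, -, hdisj⟩
        intro hc
        exact hdisj u hc u (List.mem_singleton.2 rfl) rfl
      -- characterise the reverse-adjacency list for u
      have hrev : (pvBuildB es).2.getD u [] = pvRevAt es u := pv_rev_getD es u
      have hL1 : (pvRevAt es u).Nodup := pv_revAt_nodup hk u
      have hL2 : ∀ i ∈ pvRevAt es u, ∃ s, (i, s) ∈ es ∧ s ≠ [] := by
        intro i hi
        obtain ⟨s, hs, hus⟩ := pv_mem_revAt.1 hi
        exact ⟨s, hs, List.ne_nil_of_mem ((PySem.Set.mem_ofList _ _).1 hus)⟩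
      have hmemrev : ∀ p ∈ es, (p.1 ∈ pvRevAt es u ↔ u ∈ PySem.Set.ofList p.2) := by
        intro p hp
        constructor
        · intro h
          obtain ⟨s, hs, hus⟩ := pv_mem_revAt.1 h
          have : (p.1, s) = p := pv_key_unique hk hs hp rfl
          rw [← this]; exact hus
        · intro h
          exact pv_mem_revAt.2 ⟨p.2, by rw [Prod.mk.eta]; exact hp, h⟩
      have hcnt : ∀ p ∈ es, rm.getD p.1 0 = ((PySem.Set.ofList p.2).length : Int)
          - ((PySem.Set.ofList p.2).countP
              (fun x => decide (x ∈ fl ∧ x ∉ q.dropLast)) : Int)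
          + (if p.1 ∈ pvRevAt es u then 1 else 0) := by
        intro p hp
        have hsplit := pv_countP_split (PySem.Set.nodup_ofList p.2)
          (fun x => x ∈ fl ∧ x ∉ q.dropLast) (fun x => x ∈ fl ∧ x ∉ q)
          (fun x _ hxu => by
            constructor
            · rintro ⟨hxf, hxq0⟩
              refine ⟨hxf, ?_⟩
              rw [← hqdec]
              simp only [List.mem_append, List.mem_singleton]
              rintro (hc | hc)
              · exact hxq0 hc
              · exact hxu hc
            · rintro ⟨hxf, hxq⟩
              refine ⟨hxf, fun hc => hxq ?_⟩
              rw [← hqdec]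
              exact List.mem_append_left _ hc)
          ⟨hufl, huq0⟩ (fun hc => hc.2 huq)
        rw [h7 p hp, if_congr (hmemrev p hp) rfl rfl, hsplit]
        by_cases hus : u ∈ PySem.Set.ofList p.2
        · rw [if_pos hus, if_pos hus]; push_cast; ring
        · rw [if_neg hus, if_neg hus]; push_cast; ring
      have htrig : ∀ p ∈ es, p.2 ≠ [] → p.1 ∉ pvRevAt es u →
          (∀ x ∈ p.2, x ∈ fl ∧ x ∉ q.dropLast) → p.1 ∈ fl := by
        intro p hp hne hpL hsub
        have hus : u ∉ PySem.Set.ofList p.2 := fun hc => hpL ((hmemrev p hp).2 hc)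
        refine h8 p hp hne ?_
        intro x hx
        obtain ⟨hxf, hxq0⟩ := hsub x hx
        refine ⟨hxf, ?_⟩
        rw [← hqdec]
        simp only [List.mem_append, List.mem_singleton]
        rintro (hc | hc)
        · exact hxq0 hc
        · subst hc
          exact hus ((PySem.Set.mem_ofList _ _).2 hx)
      obtain ⟨a1, a2, a3, a4, a5, a6, a7, a8, a9, a10⟩ :=
        pv_innerB_spec es index hk fl q.dropLast (pvRevAt es u) hL1 hL2 rm fl q.dropLast
          (fun x => Iff.rfl) h1 hq0nd
          (fun x hx => h3 x (by rw [← hqdec]; exact List.mem_append_left _ hx))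
          h4 h5 h6 hcnt htrig
      dsimp only at a1 a2 a3 a4 a5 a6 a7 a8 a9 a10 ⊢
      rw [hrev]
      refine ih _ _ _ ⟨a2, a3, a4, a5, a6, a7, ?_, ?_⟩ ?_
      · intro p hp
        rw [a8 p hp]
        congr 2
        refine List.countP_congr ?_
        intro x _
        simp only [decide_eq_true_eq]
        exact (a1 x).symm
      · intro p hp hne hsub
        refine a9 p hp hne ?_
        intro x hx
        exact (a1 x).1 (hsub x hx)
      · have hql : q.length = q.dropLast.length + 1 := by
          rw [← hqdec]; simp
        omega

lemma pv_B_char (es : List (Int × List Int)) (index : Int)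
    (hk : (es.map Prod.fst).Nodup) :
    (pvBFSB (pvBuildB es).2 (es.length + 1) (pvBuildB es).1 [index] [index]).Nodup ∧
      (∀ x, x ∈ pvBFSB (pvBuildB es).2 (es.length + 1) (pvBuildB es).1 [index] [index]
        ↔ pvFalls es index x) := by
  refine pv_bfsB_spec es index hk (es.length + 1) (pvBuildB es).1 [index] [index]
    ⟨by simp, by simp, by simp, by simp, ?_, ?_, ?_, ?_⟩ (by simp; omega)
  · intro x hx
    simp only [List.mem_singleton] at hx
    simp [hx]
  · intro x hx
    simp only [List.mem_singleton] at hx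
    subst hx
    exact pvFalls.base
  · intro p hp
    have hz : (PySem.Set.ofList p.2).countP
        (fun x => decide (x ∈ [index] ∧ x ∉ [index])) = 0 := by
      refine List.countP_eq_zero.2 ?_
      intro x _
      simp
    rw [pv_rm_getD es hk hp, hz]
    simp
  · intro p hp hne hsub
    obtain ⟨y, hy⟩ := List.exists_mem_of_ne_nil p.2 hne
    exact absurd ((hsub y hy).1) (fun h => (hsub y hy).2 h)

-- ===== VERDICT (by name: the statement is the Claim_ definition above) =====
theorem count_supported_by_spec : Claim_equal_count_supported_by := by
  intro bsb index _
  unfold Spec_count_supported_by count_supported_by count_supported_by_alt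
  have hk : ((PySem.Dict.ofList bsb).items.map Prod.fst).Nodup :=
    PySem.Dict.nodup_keys_ofList bsb
  obtain ⟨hA, hAm⟩ := pv_A_char (PySem.Dict.ofList bsb).items index
  obtain ⟨hB, hBm⟩ := pv_B_char (PySem.Dict.ofList bsb).items index hk
  have hperm := (List.perm_ext_iff_of_nodup hA hB).2 (by
    intro a; rw [hAm a, hBm a])
  simp only [hperm.length_eq]
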